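-- pv_equiv track=rewrite | github.com/KMORaza/leetcode-solutions | LeetCode Solutions/1764.py | canChoose
-- ===== SOURCE A (Python) =====
-- from typing import List
--
-- def canChoose(groups: List[List[int]], nums: List[int]) -> bool:
--     index = 0
--     n = len(nums)
--     for group in groups:
--         group_size = len(group)
--         found = False
--         while index <= n - group_size:
--             if nums[index:index + group_size] == group:
--                 index += group_size
--                 found = True
--                 break
--             index += 1
--         if not found:
--             return False
--     return True
-- ===== SOURCE B (Python) =====
-- from typing import List, Optional
--
-- def _isPrefix(p: List[int], xs: List[int]) -> bool:
--     return len(p) <= len(xs) and all(a == b for a, b in zip(p, xs))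
--
-- def _consume(rest: List[int], g: List[int]) -> Optional[List[int]]:
--     # drop elements from the front until g is a prefix; return the suffix after g
--     while True:
--         if _isPrefix(g, rest):
--             return rest[len(g):]
--         if not rest:
--             return None
--         rest = rest[1:]
--
-- def canChoose(groups: List[List[int]], nums: List[int]) -> bool:
--     rest = nums
--     for g in groups:
--         rest = _consume(rest, g)
--         if rest is None:
--             return False
--     return True
-- ===== Notes on version B (the rewrite author's own statement) =====
-- stated objective: simpler
-- what changed: replaces A's index/while-loop with a found flag and repeated slice comparisons by a structural recursion that drops elements until the group is a prefix of the remaining suffix and threads that suffix through the groups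
import Mathlib
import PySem

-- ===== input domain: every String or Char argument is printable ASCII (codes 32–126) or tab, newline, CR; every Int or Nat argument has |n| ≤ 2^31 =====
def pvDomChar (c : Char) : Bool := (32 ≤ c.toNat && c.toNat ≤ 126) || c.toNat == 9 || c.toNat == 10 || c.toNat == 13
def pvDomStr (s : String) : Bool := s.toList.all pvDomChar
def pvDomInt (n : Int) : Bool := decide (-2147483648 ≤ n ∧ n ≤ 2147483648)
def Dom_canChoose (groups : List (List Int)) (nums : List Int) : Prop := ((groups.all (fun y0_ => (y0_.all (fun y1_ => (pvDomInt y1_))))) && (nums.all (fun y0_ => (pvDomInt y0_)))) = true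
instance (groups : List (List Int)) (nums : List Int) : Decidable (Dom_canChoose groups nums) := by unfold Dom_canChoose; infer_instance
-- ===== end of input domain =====

-- B replaces A's index/while-loop with flag and slice comparisons by a structural
-- recursion that drops elements until the group is a prefix of the remaining suffix (objective: simpler).


-- ===== PORT A =====
-- the inner `while index <= n - group_size` loop: returns the updated index after a
-- successful match (the `break` with found = True), none for `found = False`;
-- fuel bounds the number of iterations (it only makes the loop total, never taken)
def canChooseFind (nums : List Int) (n : Int) (group : List Int) (group_size : Int) :
    Nat → Int → Option Int
  | 0, _ => none
  | fuel + 1, index =>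
    if index ≤ n - group_size then
      if PySem.List.slice nums (some index) (some (index + group_size)) = group then
        some (index + group_size)
      else
        canChooseFind nums n group group_size fuel (index + 1)
    else
      none

-- the `for group in groups` loop, threading `index`
def canChooseLoop (nums : List Int) (n : Int) : List (List Int) → Int → Bool
  | [], _ => true
  | group :: gs, index =>
    match canChooseFind nums n group (group.length : Int) (nums.length + 1) index with
    | some index' => canChooseLoop nums n gs index'
    | none => false

def canChoose (groups : List (List Int)) (nums : List Int) : Bool :=
  canChooseLoop nums (nums.length : Int) groups 0

-- ===== PORT B =====
def isPrefixB (p xs : List Int) : Bool :=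
  decide (p.length ≤ xs.length) && (p.zip xs).all (fun ab => ab.1 == ab.2)

def consumeB (rest g : List Int) : Option (List Int) :=
  if isPrefixB g rest then
    some (rest.drop g.length)
  else
    match rest with
    | [] => none
    | _ :: t => consumeB t g

def canChoose_alt (groups : List (List Int)) (nums : List Int) : Bool :=
  match groups with
  | [] => true
  | g :: gs =>
    match consumeB nums g with
    | some rest => canChoose_alt gs rest
    | none => false

-- ===== PRECONDITION & SPEC =====
def Spec_canChoose (groups : List (List Int)) (nums : List Int) (out : Bool) : Prop := out = canChoose_alt groups nums
instance (groups : List (List Int)) (nums : List Int) (out : Bool) : Decidable (Spec_canChoose groups nums out) := by unfold Spec_canChoose; infer_instance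

-- ===== CLAIM (what is proved, stated in full; the proofs are below) =====
def Claim_equal_canChoose : Prop := ∀ (groups : List (List Int)) (nums : List Int), Dom_canChoose groups nums → Spec_canChoose groups nums (canChoose groups nums)

-- ===== LEMMAS AND PROOFS =====

theorem isPrefixB_cons (a b : Int) (p xs : List Int) :
    isPrefixB (a :: p) (b :: xs) = ((a == b) && isPrefixB p xs) := by
  simp only [isPrefixB, List.zip_cons_cons, List.all_cons, List.length_cons,
    Nat.add_le_add_iff_right]
  cases h : (a == b)
  · simp
  · simp

theorem isPrefixB_iff (p xs : List Int) : isPrefixB p xs = true ↔ xs.take p.length = p := by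
  induction p generalizing xs with
  | nil => simp [isPrefixB]
  | cons a p ih =>
    cases xs with
    | nil => simp [isPrefixB]
    | cons b xs =>
      rw [isPrefixB_cons]
      simp [ih, eq_comm (a := b)]

theorem consumeB_none_of_short (rest g : List Int) (h : rest.length < g.length) :
    consumeB rest g = none := by
  induction rest with
  | nil =>
    rw [consumeB]
    have : isPrefixB g [] = false := by
      cases g with
      | nil => simp at h
      | cons a g => simp [isPrefixB]
    simp [this]
  | cons x t ih =>
    rw [consumeB]
    have : isPrefixB g (x :: t) = false := by
      rcases hb : isPrefixB g (x :: t) with _ | _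
      · rfl
      · exfalso
        have := (isPrefixB_iff g (x :: t)).1 hb
        have hl := congrArg List.length this
        simp only [List.length_take, List.length_cons] at hl
        simp only [List.length_cons] at h
        omega
    simp [this]
    exact ih (by simp only [List.length_cons] at h; omega)

theorem consumeB_suffix (rest g r : List Int) (h : consumeB rest g = some r) :
    ∃ k, k ≤ rest.length ∧ r = rest.drop k := by
  induction rest with
  | nil =>
    rw [consumeB] at h
    by_cases hp : isPrefixB g [] = true
    · simp [hp] at h
      refine ⟨0, by simp, ?_⟩
      have := (isPrefixB_iff g []).1 hp
      simp at this
      simp [← h]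
    · simp [hp] at h
  | cons x t ih =>
    rw [consumeB] at h
    by_cases hp : isPrefixB g (x :: t) = true
    · simp [hp] at h
      have hlen : g.length ≤ (x :: t).length := by
        have := (isPrefixB_iff g (x :: t)).1 hp
        have := congrArg List.length this
        simp at this
        simp
        omega
      exact ⟨g.length, hlen, h.symm⟩
    · simp [hp] at h
      obtain ⟨k, hk, hr⟩ := ih h
      exact ⟨k + 1, by simp; omega, by simpa using hr⟩

theorem findEq (nums g : List Int) (j : Nat) (hj : j ≤ nums.length) (fuel : Nat)
    (hf : nums.length - j < fuel) :
    canChooseFind nums (nums.length : Int) g (g.length : Int) fuel (j : Int) =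
      (consumeB (nums.drop j) g).map (fun r => ((nums.length : Int) - (r.length : Int))) := by
  induction fuel generalizing j with
  | zero => omega
  | succ fuel ih =>
    rw [canChooseFind]
    by_cases hp : isPrefixB g (nums.drop j) = true
    · have htake := (isPrefixB_iff g (nums.drop j)).1 hp
      have hlen : g.length ≤ nums.length - j := by
        have := congrArg List.length htake
        simp at this
        omega
      have hguard : ((j : Int) ≤ (nums.length : Int) - (g.length : Int)) := by
        omega
      have hslice : PySem.List.slice nums (some (j : Int)) (some ((j : Int) + (g.length : Int))) = g := by
        rw [PySem.List.slice_natCast_add]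
        exact htake
      rw [if_pos hguard, if_pos hslice, consumeB.eq_def]
      simp [hp]
      omega
    · by_cases hguard : ((j : Int) ≤ (nums.length : Int) - (g.length : Int))
      · -- slice has full length g.length but is not a prefix match
        have hlen : g.length ≤ nums.length - j := by
          omega
        have hslice : PySem.List.slice nums (some (j : Int)) (some ((j : Int) + (g.length : Int))) ≠ g := by
          rw [PySem.List.slice_natCast_add]
          intro he
          exact hp ((isPrefixB_iff g (nums.drop j)).2 he)
        rw [if_pos hguard, if_neg hslice]
        have hg : g ≠ [] := by
          intro he; subst he; simp [isPrefixB] at hp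
        have hglen : 0 < g.length := List.length_pos_iff.2 hg
        have hrest : ∃ x t, nums.drop j = x :: t := by
          have : (nums.drop j).length = nums.length - j := by simp
          cases hc : nums.drop j with
          | nil => rw [hc] at this; simp at this; omega
          | cons x t => exact ⟨x, t, rfl⟩
        obtain ⟨x, t, hc⟩ := hrest
        have ht : t = nums.drop (j + 1) := by
          have : (nums.drop j).tail = nums.drop (j + 1) := by
            rw [List.tail_drop]
          rw [hc] at this
          simpa using this
        have hcast : ((j : Int) + 1) = ((j + 1 : Nat) : Int) := by push_cast; ring
        rw [hcast, ih (j + 1) (by omega) (by omega), hc]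
        rw [hc] at hp
        rw [ht] at hp
        conv_rhs => rw [consumeB.eq_def]
        simp [hp, ht]
      · -- remaining segment shorter than g: A's while loop exits; consumeB hits []
        rw [if_neg hguard]
        have hlen : nums.length - j < g.length := by
          push_cast at hguard; omega
        have hnone : consumeB (nums.drop j) g = none :=
          consumeB_none_of_short _ _ (by simp; omega)
        simp [hnone]

theorem loopEq (nums : List Int) (gs : List (List Int)) (j : Nat) (hj : j ≤ nums.length) :
    canChooseLoop nums (nums.length : Int) gs (j : Int) = canChoose_alt gs (nums.drop j) := by
  induction gs generalizing j with
  | nil => simp [canChooseLoop, canChoose_alt]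
  | cons g gs ih =>
    rw [canChooseLoop, canChoose_alt, findEq nums g j hj (nums.length + 1) (by omega)]
    cases hc : consumeB (nums.drop j) g with
    | none => simp
    | some r =>
      obtain ⟨k, hk, hr⟩ := consumeB_suffix _ _ _ hc
      have hrlen : r.length = nums.length - (j + k) := by
        rw [hr]; simp
      have hdrop : r = nums.drop (j + k) := by
        rw [hr, List.drop_drop]
      have hcast : ((nums.length : Int) - (r.length : Int)) = ((j + k : Nat) : Int) := by
        rw [hrlen]
        have : (nums.drop j).length = nums.length - j := by simp
        push_cast
        omega
      simp only [Option.map_some]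
      rw [hcast, ih (j + k) (by omega), hdrop]

-- ===== VERDICT (by name: the statement is the Claim_ definition above) =====
theorem canChoose_spec : Claim_equal_canChoose := by
  intro groups nums _
  unfold Spec_canChoose canChoose
  have := loopEq nums groups 0 (by omega)
  simpa using this
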